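-- pv_equiv track=rewrite | github.com/alyssating/CS101-APTs | CS101 Final Practice APTs/MaxOrder.py | forItem
-- ===== SOURCE A (Python) =====
-- def forItem(orders, item):
--     '''
--     orders (list of strs) - list of orders for items in format "ITEM:QUANTITY"
--     item (str) - item of interest in ORDERS
--
--     Return in a list the largest ordered quantity for ITEM in ORDERS
--     and how many times that quantity was ordered.
--     '''
--
--     lst = [(i.split(":")[0],int(i.split(":")[1])) for i in orders]
--
--     if item not in [x[0] for x in lst]:
--         return [0,0]
--
--     maxCount = 0
--     count = 0
--
--     for i in lst:
--         if i[0] == item and i[1] >= maxCount: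
--             maxCount = i[1]
--
--     for i in lst:
--         if i[0] == item and i[1] == maxCount:
--             count += 1
--
--     return [maxCount,count]
-- ===== SOURCE B (Python) =====
-- def forItem(orders, item):
--     pairs = [(o.split(":")[0], int(o.split(":")[1])) for o in orders]
--     counts = {}
--     for name, q in pairs:
--         if name == item:
--             counts[q] = counts.get(q, 0) + 1
--     if not counts:
--         return [0, 0]
--     m = max(counts)
--     return [m, counts[m]]
-- ===== Notes on version B (the rewrite author's own statement) =====
-- stated objective: idiomatic
-- what changed: A's membership scan plus two separate running-max/count passes over the parsed list are replaced by a single pass building a frequency table (quantity -> occurrences) for the item, from which the maximum quantity and its count are read off; Pre_ excludes only the order strings on which A raises (no ':' or a non-integer quantity).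
-- intended difference: On inputs where item does appear but every quantity ordered for it is negative, A returns [0,0] because its running max starts at 0, while B returns the true largest (negative) quantity and how many times it was ordered, which is what the docstring asks for. — e.g. on forItem(["a:-3"], "a"): A returns [0, 0], B returns [-3, 1]
import Mathlib
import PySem

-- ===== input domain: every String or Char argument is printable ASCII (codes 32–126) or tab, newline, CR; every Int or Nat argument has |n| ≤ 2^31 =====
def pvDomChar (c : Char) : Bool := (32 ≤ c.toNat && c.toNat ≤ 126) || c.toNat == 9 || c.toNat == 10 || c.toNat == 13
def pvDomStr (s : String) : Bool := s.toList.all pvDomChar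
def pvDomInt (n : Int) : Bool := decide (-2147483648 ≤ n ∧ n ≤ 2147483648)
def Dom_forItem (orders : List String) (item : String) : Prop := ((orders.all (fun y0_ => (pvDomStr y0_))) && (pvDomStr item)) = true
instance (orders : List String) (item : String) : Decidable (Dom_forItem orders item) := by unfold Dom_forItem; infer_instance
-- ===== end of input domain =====

-- B replaces A's membership scan and two running passes by one pass building a frequency
-- table of the item's quantities; B returns the true maximum when all quantities are
-- negative, where A returns [0,0] — stated as the intended difference D_ below.

-- shared parse of one order string: (o.split(":")[0], int(o.split(":")[1]))
-- (total form; Pre_forItem guarantees the index and int() succeed)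
def pvParse (o : String) : String × Int :=
  (((PySem.Str.split? o ":").getD []).getD 0 "",
   (PySem.Int.ofStr? (((PySem.Str.split? o ":").getD []).getD 1 "")).getD 0)

-- ===== PORT A =====
def forItem (orders : List String) (item : String) : List Int :=
  let lst := orders.map pvParse
  if !((lst.map (fun x => x.1)).contains item) then [0, 0]
  else
    let maxCount := lst.foldl (fun maxCount i => if i.1 == item && decide (maxCount ≤ i.2) then i.2 else maxCount) 0
    let count := lst.foldl (fun count i => if i.1 == item && i.2 == maxCount then count + 1 else count) (0 : Int)
    [maxCount, count]

-- ===== PORT B =====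
def forItem_alt (orders : List String) (item : String) : List Int :=
  let pairs := orders.map pvParse
  let counts := pairs.foldl (fun d p => if p.1 == item then d.insert p.2 (d.getD p.2 0 + 1) else d) (PySem.Dict.empty : PySem.Dict Int Int)
  if counts.size == 0 then [0, 0]
  else
    let m := (PySem.List.max? counts.keys (fun y => y)).getD 0
    [m, counts.getD m 0]

-- ===== PRECONDITION & SPEC =====
-- Pre_ excludes exactly the inputs where A raises: an order string with no ':'
-- (IndexError on split(":")[1]) or whose part after the first ':' is not int()-parsable (ValueError).
def Pre_forItem (orders : List String) (item : String) : Prop :=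
  ∀ o ∈ orders, 2 ≤ ((PySem.Str.split? o ":").getD []).length ∧
    (PySem.Int.ofStr? (((PySem.Str.split? o ":").getD []).getD 1 "")).isSome = true
instance (orders : List String) (item : String) : Decidable (Pre_forItem orders item) := by unfold Pre_forItem; infer_instance

def pvWitness_forItem : List String × String := (["a:3", "b:2", "a:3"], "a")

-- On inputs where item appears but every quantity ordered for it is negative, A returns
-- [0,0] (its running max starts at 0), while B returns the true largest (negative)
-- quantity and its count, which is what the docstring asks for.
def D_forItem (orders : List String) (item : String) : Prop :=
  (((orders.map pvParse).filter (fun p => p.1 == item)).map (fun p => p.2)) ≠ [] ∧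
  ∀ q ∈ (((orders.map pvParse).filter (fun p => p.1 == item)).map (fun p => p.2)), q < 0
instance (orders : List String) (item : String) : Decidable (D_forItem orders item) := by unfold D_forItem; infer_instance

def Spec_forItem (orders : List String) (item : String) (out : List Int) : Prop := ¬ D_forItem orders item → out = forItem_alt orders item
instance (orders : List String) (item : String) (out : List Int) : Decidable (Spec_forItem orders item out) := by unfold Spec_forItem; infer_instance

def pvDiffWitness_forItem : List String × String := (["a:-3"], "a")
def pvDiffWitnessOut_forItem : (List Int) × (List Int) := ([0, 0], [-3, 1])

-- ===== CLAIM (what is proved, stated in full; the proofs are below) =====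
def Claim_unchanged_forItem : Prop := ∀ (orders : List String) (item : String), Dom_forItem orders item → Pre_forItem orders item → Spec_forItem orders item (forItem orders item)
def Claim_changed_forItem : Prop := Dom_forItem (pvDiffWitness_forItem.1) (pvDiffWitness_forItem.2) ∧ Pre_forItem (pvDiffWitness_forItem.1) (pvDiffWitness_forItem.2) ∧ D_forItem (pvDiffWitness_forItem.1) (pvDiffWitness_forItem.2) ∧ forItem (pvDiffWitness_forItem.1) (pvDiffWitness_forItem.2) = pvDiffWitnessOut_forItem.1 ∧ forItem_alt (pvDiffWitness_forItem.1) (pvDiffWitness_forItem.2) = pvDiffWitnessOut_forItem.2 ∧ pvDiffWitnessOut_forItem.1 ≠ pvDiffWitnessOut_forItem.2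
def Claim_exact_forItem : Prop := ∀ (orders : List String) (item : String), Dom_forItem orders item → Pre_forItem orders item → D_forItem orders item → forItem orders item ≠ forItem_alt orders item

-- ===== LEMMAS AND PROOFS =====

-- a fold of max over membership-equal lists is the same (the running max is determined by the members)
lemma pvFoldlMaxCongr (xs ys : List Int) (a : Int) (h : ∀ x, x ∈ xs ↔ x ∈ ys) :
    xs.foldl max a = ys.foldl max a := by
  apply le_antisymm
  · rcases PySem.List.foldl_max_mem xs a with h1 | h1
    · rw [h1]; exact (PySem.List.le_foldl_max ys a).1
    · exact (PySem.List.le_foldl_max ys a).2 _ ((h _).1 h1)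
  · rcases PySem.List.foldl_max_mem ys a with h1 | h1
    · rw [h1]; exact (PySem.List.le_foldl_max xs a).1
    · exact (PySem.List.le_foldl_max xs a).2 _ ((h _).2 h1)

lemma pvMaxFoldl (t : List Int) (a b : Int) : max a (t.foldl max b) = t.foldl max (max a b) := by
  induction t generalizing b with
  | nil => rfl
  | cons x t ih => simp only [List.foldl_cons, ih, max_assoc]

-- A's first loop equals the running max over qs, B's dict is the counter of qs,
-- A's membership test is qs-nonemptiness, A's second loop counts v in qs.
lemma pvFoldCounts (orders : List String) (item : String) :
    (orders.map pvParse).foldl (fun d p => if p.1 == item then d.insert p.2 (d.getD p.2 0 + 1) else d) (PySem.Dict.empty : PySem.Dict Int Int)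
      = PySem.Dict.counter (((orders.map pvParse).filter (fun p => p.1 == item)).map (fun p => p.2)) := by
  rw [PySem.List.foldl_if_eq_foldl_filter,
      ← PySem.Dict.foldl_insert_getD_add_one_eq_counter, List.foldl_map]

lemma pvFoldMax (orders : List String) (item : String) :
    (orders.map pvParse).foldl (fun maxCount i => if i.1 == item && decide (maxCount ≤ i.2) then i.2 else maxCount) 0
      = (((orders.map pvParse).filter (fun p => p.1 == item)).map (fun p => p.2)).foldl max 0 := by
  have hfg : ∀ (acc : Int), ∀ i ∈ orders.map pvParse,
      (if i.1 == item && decide (acc ≤ i.2) then i.2 else acc)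
      = (if i.1 == item then max acc i.2 else acc) := by
    intro acc i _
    by_cases h1 : i.1 == item <;> by_cases h2 : acc ≤ i.2 <;>
      simp [h1, h2] <;> omega
  rw [PySem.List.foldl_congr_mem (orders.map pvParse) _
        (fun acc i => if i.1 == item then max acc i.2 else acc) 0 hfg,
      PySem.List.foldl_if_eq_foldl_filter, List.foldl_map]

lemma pvFoldCount (orders : List String) (item : String) (v : Int) :
    (orders.map pvParse).foldl (fun count i => if i.1 == item && i.2 == v then count + 1 else count) (0 : Int)
      = ((((orders.map pvParse).filter (fun p => p.1 == item)).map (fun p => p.2)).count v : Int) := by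
  have hfg : ∀ (acc : Int), ∀ i ∈ orders.map pvParse,
      (if i.1 == item && i.2 == v then acc + 1 else acc)
      = (if i.1 == item then (if i.2 == v then acc + 1 else acc) else acc) := by
    intro acc i _
    by_cases h1 : i.1 == item <;> by_cases h2 : i.2 == v <;> simp [h1, h2]
  rw [PySem.List.foldl_congr_mem (orders.map pvParse) _
        (fun acc i => if i.1 == item then (if i.2 == v then acc + 1 else acc) else acc) 0 hfg,
      PySem.List.foldl_if_eq_foldl_filter, PySem.List.foldl_if_add_one]
  simp [List.count, List.countP_map, Function.comp_def]

lemma pvMemTest (orders : List String) (item : String) :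
    (((orders.map pvParse).map (fun x => x.1)).contains item)
      = !(((orders.map pvParse).filter (fun p => p.1 == item)).map (fun p => p.2)).isEmpty := by
  set lst := orders.map pvParse
  set qs := (lst.filter (fun p => p.1 == item)).map (fun p => p.2) with hqs
  rcases h : qs.isEmpty with _ | _
  · have h' : qs ≠ [] := by
      intro h0; rw [h0] at h; simp at h
    simp only [hqs, ne_eq, List.map_eq_nil_iff, List.filter_eq_nil_iff, not_forall] at h'
    obtain ⟨p, hp, hpe⟩ := h'
    simp only [Bool.not_false, List.contains_eq_mem, decide_eq_true_iff, List.mem_map]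
    exact ⟨p, hp, by simpa using hpe⟩
  · rw [List.isEmpty_iff] at h
    simp only [hqs, List.map_eq_nil_iff, List.filter_eq_nil_iff] at h
    simp only [Bool.not_true, List.contains_eq_mem, decide_eq_false_iff_not, List.mem_map]
    rintro ⟨p, hp, rfl⟩
    have := h p hp
    simp at this

-- B's m is the true maximum of qs (the fold of max over qs starting at its head)
lemma pvAltMax (orders : List String) (item : String) (k : Int) (t : List Int)
    (hk : PySem.Set.ofList (((orders.map pvParse).filter (fun p => p.1 == item)).map (fun p => p.2)) = k :: t) :
    ((PySem.List.max? (PySem.Dict.counter (((orders.map pvParse).filter (fun p => p.1 == item)).map (fun p => p.2))).keys (fun y => y)).getD 0)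
      = t.foldl max k := by
  rw [PySem.Dict.keys_counter, hk, PySem.List.max?_id_cons, Option.getD_some]

lemma pvCounterNonempty (qs : List Int) (hq : qs ≠ []) :
    ((PySem.Dict.counter qs).size == 0) = false := by
  obtain ⟨q0, hq0⟩ := List.exists_mem_of_ne_nil qs hq
  have hk0 : q0 ∈ (PySem.Dict.counter qs).keys := by
    rw [PySem.Dict.keys_counter]; exact (PySem.Set.mem_ofList _ _).2 hq0
  simp only [PySem.Dict.size, beq_eq_false_iff_ne, ne_eq]
  intro h0
  have : (PySem.Dict.counter qs).keys = [] := by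
    simp only [PySem.Dict.keys, List.length_eq_zero_iff.1 h0, List.map_nil]
  rw [this] at hk0; simp at hk0

-- ===== VERDICT =====
theorem forItem_spec : Claim_unchanged_forItem := by
  intro orders item _ _
  unfold Spec_forItem
  intro hD
  unfold forItem forItem_alt
  dsimp only
  set lst := orders.map pvParse with hlst
  set qs := (lst.filter (fun p => p.1 == item)).map (fun p => p.2) with hqs
  rw [pvFoldCounts, pvMemTest, pvFoldMax]
  by_cases hq : qs = []
  · rw [← hqs, hq]
    norm_num [PySem.Dict.counter, PySem.Dict.empty, PySem.Dict.size]
  · have hne : qs.isEmpty = false := by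
      rcases h : qs.isEmpty with _ | _
      · rfl
      · exact absurd (List.isEmpty_iff.1 h) hq
    rw [← hqs, hne, pvCounterNonempty qs hq]
    simp only [Bool.not_false, if_true, Bool.false_eq_true, if_false]
    -- since D_ fails and qs ≠ [], some quantity is ≥ 0, so the 0-seeded max is the true max
    have hnn : ∃ q ∈ qs, 0 ≤ q := by
      by_contra hc
      push_neg at hc
      refine hD ⟨hq, fun q hqmem => ?_⟩
      have := hc q hqmem; omega
    rcases hk : PySem.Set.ofList qs with _ | ⟨k, t⟩
    · obtain ⟨q0, hq0⟩ := List.exists_mem_of_ne_nil qs hq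
      have : q0 ∈ PySem.Set.ofList qs := (PySem.Set.mem_ofList _ _).2 hq0
      rw [hk] at this; simp at this
    have hmemeq : ∀ x, x ∈ (k :: t) ↔ x ∈ qs := by
      intro x; rw [← hk]; exact PySem.Set.mem_ofList _ _
    have hBm := pvAltMax orders item k t (by rw [← hqs]; exact hk)
    rw [← hqs] at hBm
    rw [hBm]
    have hfold : qs.foldl max 0 = t.foldl max k := by
      obtain ⟨q, hqmem, hq0⟩ := hnn
      have hle : q ≤ t.foldl max k := by
        rcases List.mem_cons.1 ((hmemeq q).2 hqmem) with h | h
        · subst h; exact (PySem.List.le_foldl_max t q).1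
        · exact (PySem.List.le_foldl_max t k).2 _ h
      calc qs.foldl max 0 = (k :: t).foldl max 0 :=
              (pvFoldlMaxCongr (k :: t) qs 0 hmemeq).symm
        _ = t.foldl max (max 0 k) := by simp [List.foldl_cons]
        _ = max 0 (t.foldl max k) := (pvMaxFoldl t 0 k).symm
        _ = t.foldl max k := by omega
    rw [hfold, pvFoldCount, PySem.Dict.getD_counter]
    simp [hqs, hlst]

theorem forItem_changed : Claim_changed_forItem := by
  unfold Claim_changed_forItem; decide

theorem forItem_tight : Claim_exact_forItem := by
  intro orders item _ _ hD
  obtain ⟨hq, hneg⟩ := hD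
  unfold forItem forItem_alt
  dsimp only
  set lst := orders.map pvParse with hlst
  set qs := (lst.filter (fun p => p.1 == item)).map (fun p => p.2) with hqs
  rw [hqs] at hq hneg
  have hne : qs.isEmpty = false := by
    rcases h : qs.isEmpty with _ | _
    · rfl
    · exact absurd (List.isEmpty_iff.1 h) hq
  rw [pvFoldCounts, pvMemTest, pvFoldMax, ← hqs, hne, pvCounterNonempty qs hq]
  simp only [Bool.not_false, if_true, Bool.false_eq_true, if_false]
  rcases hk : PySem.Set.ofList qs with _ | ⟨k, t⟩
  · obtain ⟨q0, hq0⟩ := List.exists_mem_of_ne_nil qs hq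
    have : q0 ∈ PySem.Set.ofList qs := (PySem.Set.mem_ofList _ _).2 hq0
    rw [hk] at this; simp at this
  have hmemeq : ∀ x, x ∈ (k :: t) ↔ x ∈ qs := by
    intro x; rw [← hk]; exact PySem.Set.mem_ofList _ _
  have hBm := pvAltMax orders item k t (by rw [← hqs]; exact hk)
  rw [← hqs] at hBm
  rw [hBm]
  -- B's head (the true max) is a member of qs, hence negative; A's head is 0
  have hBneg : t.foldl max k < 0 := by
    rcases PySem.List.foldl_max_mem t k with h | h
    · rw [h]; exact hneg k ((hmemeq k).1 (by simp))
    · exact hneg _ ((hmemeq _).1 (by simp [h]))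
  -- A's running max seeded with 0 stays 0: all members are < 0
  have hAmax : qs.foldl max 0 = 0 := by
    rcases PySem.List.foldl_max_mem qs 0 with h | h
    · exact h
    · have := hneg _ h
      have h0 := (PySem.List.le_foldl_max qs (0 : Int)).1
      omega
  rw [hAmax]
  intro hcontra
  have := List.head_eq_of_cons_eq hcontra
  omega
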